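-- pv_equiv track=rewrite | github.com/BattleForged/codejam | 2022_1a/c.py | generate_overlap
-- ===== SOURCE A (Python) =====
-- def generate_overlap(step, e, w):
--     ret = []
--     for i in range(e+2):
--         tmp = []
--         for j in range(e+2):
--             tmp.append([0]*w)
--         ret.append(tmp)
--
--     for i in range(e+2):
--         x = [a for a in step[i]]
--         for j in range(i, e+2):
--             for k in range(w):
--                 x[k] = min(x[k], step[j][k])
--                 ret[i][j][k] = x[k]
--     return ret
-- ===== SOURCE B (Python) =====
-- def generate_overlap(step, e, w):
--     # Backward recurrence: row i is built from row i+1 (ret[i][j] = min(step[i], ret[i+1][j]) pointwise),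
--     # instead of A's forward running-minimum accumulator.
--     n = e + 2
--     rows = []
--     for i in range(n - 1, -1, -1):
--         row = [[0] * w for _ in range(i)]
--         row.append([step[i][k] for k in range(w)])
--         if rows:
--             prev = rows[0]
--             for j in range(i + 1, n):
--                 row.append([min(step[i][k], prev[j][k]) for k in range(w)])
--         rows.insert(0, row)
--     return rows
-- ===== Notes on version B (the rewrite author's own statement) =====
-- stated objective: alternative
-- what changed: Replaces A's forward running-minimum accumulator x (mutating a preallocated zero tensor row by row) with a backward recurrence that builds each row i functionally from the already-built row i+1 via pointwise min(step[i], ret[i+1][j]).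
import Mathlib
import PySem

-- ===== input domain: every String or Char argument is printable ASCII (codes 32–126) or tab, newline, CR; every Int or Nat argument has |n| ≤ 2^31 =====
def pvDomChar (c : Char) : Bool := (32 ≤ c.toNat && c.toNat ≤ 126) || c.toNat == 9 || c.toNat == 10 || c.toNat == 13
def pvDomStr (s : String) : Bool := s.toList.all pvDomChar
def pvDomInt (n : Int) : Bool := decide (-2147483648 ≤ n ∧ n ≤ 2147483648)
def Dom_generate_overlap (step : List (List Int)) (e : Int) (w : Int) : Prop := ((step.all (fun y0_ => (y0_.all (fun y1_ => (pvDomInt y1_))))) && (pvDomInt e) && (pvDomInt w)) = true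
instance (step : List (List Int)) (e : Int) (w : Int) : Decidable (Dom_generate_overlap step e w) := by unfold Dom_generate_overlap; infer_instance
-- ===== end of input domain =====

-- B replaces A's forward running-minimum accumulator over a preallocated mutated zero
-- tensor by a backward recurrence building each row i functionally from row i+1;
-- same return value on every input admitted by Pre_ (A mutates only its local ret).

-- ===== PORT A =====
-- inner loop body: for k in range(w): x[k] = min(x[k], step[j][k]); ret[i][j][k] = x[k]
def innerStepA (sj : List Int) (st : List Int × List Int) (k : Nat) : List Int × List Int :=
  let x' := st.1.set k (min (st.1.getD k 0) (sj.getD k 0))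
  (x', st.2.set k (x'.getD k 0))

-- body of 'for j in range(i, e+2)': state is (x, ret); only row i of ret is written
def jStepA (step : List (List Int)) (wn i : Nat)
    (st : List Int × List (List (List Int))) (j : Nat) : List Int × List (List (List Int)) :=
  let sj := step.getD j []
  let r := (List.range wn).foldl (innerStepA sj) (st.1, (st.2.getD i []).getD j [])
  (r.1, st.2.set i ((st.2.getD i []).set j r.2))

def generate_overlap (step : List (List Int)) (e : Int) (w : Int) : List (List (List Int)) :=
  let n := (e + 2).toNat
  let wn := w.toNat
  -- ret = (e+2) x (e+2) matrix of [0]*w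
  let ret0 : List (List (List Int)) :=
    (List.range n).map (fun _ => (List.range n).map (fun _ => List.replicate wn (0 : Int)))
  (List.range n).foldl
    (fun ret i =>
      -- x = [a for a in step[i]]  (ports are pure, so the getD read is the fresh copy)
      ((List.range' i (n - i)).foldl (jStepA step wn i) (step.getD i [], ret)).2)
    ret0

-- ===== PORT B =====
-- one row of B: zeros below the diagonal, step[i] prefix on it, and above it the
-- pointwise min of step[i] with the previously built row i+1 (the head of rows)
def rowB (step : List (List Int)) (wn n i : Nat) (rows : List (List (List Int))) : List (List Int) :=
  let base := (List.range i).map (fun _ => List.replicate wn (0 : Int))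
    ++ [(List.range wn).map (fun k => (step.getD i []).getD k 0)]
  match rows with
  | [] => base
  | prev :: _ =>
      base ++ (List.range' (i + 1) (n - (i + 1))).map (fun j =>
        (List.range wn).map (fun k =>
          min ((step.getD i []).getD k 0) ((prev.getD j []).getD k 0)))

def generate_overlap_alt (step : List (List Int)) (e : Int) (w : Int) : List (List (List Int)) :=
  let n := (e + 2).toNat
  let wn := w.toNat
  -- for i in range(n-1, -1, -1): build row i from the head of rows, prepend it
  (List.range n).foldr (fun i rows => rowB step wn n i rows :: rows) []

-- ===== PRECONDITION & SPEC =====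
-- Pre_ excludes exactly the inputs where Python A raises an IndexError: fewer than
-- e+2 rows in step, or one of the first e+2 rows shorter than w.
def Pre_generate_overlap (step : List (List Int)) (e : Int) (w : Int) : Prop :=
  (e + 2).toNat ≤ step.length ∧ ∀ r ∈ step.take (e + 2).toNat, w ≤ (r.length : Int)
instance (step : List (List Int)) (e : Int) (w : Int) : Decidable (Pre_generate_overlap step e w) := by
  unfold Pre_generate_overlap; infer_instance

def pvWitness_generate_overlap : List (List Int) × Int × Int := ([[1, 5], [3, 4], [2, 6]], 1, 2)

def Spec_generate_overlap (step : List (List Int)) (e : Int) (w : Int) (out : List (List (List Int))) : Prop := out = generate_overlap_alt step e w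
instance (step : List (List Int)) (e : Int) (w : Int) (out : List (List (List Int))) : Decidable (Spec_generate_overlap step e w out) := by unfold Spec_generate_overlap; infer_instance

-- ===== CLAIM (what is proved, stated in full; the proofs are below) =====
def Claim_equal_generate_overlap : Prop := ∀ (step : List (List Int)) (e : Int) (w : Int), Dom_generate_overlap step e w → Pre_generate_overlap step e w → Spec_generate_overlap step e w (generate_overlap step e w)

-- ===== LEMMAS AND PROOFS =====

-- value of step[l][k] as read through getD (equal to the Python read inside Pre_)
def valk (step : List (List Int)) (l k : Nat) : Int := (step.getD l []).getD k 0

def zs (wn : Nat) : List Int := List.replicate wn (0 : Int)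

-- min of valk over l ∈ [i..j] (for i ≤ j), written as A's forward fold
def mval (step : List (List Int)) (i j k : Nat) : Int :=
  ((List.range' (i + 1) (j - i)).map (fun l => valk step l k)).foldl min (valk step i k)

-- min-fold from an arbitrary seed X over l ∈ [j..j']
def mfold (step : List (List Int)) (X : Nat → Int) (j j' k : Nat) : Int :=
  ((List.range' j (j' + 1 - j)).map (fun l => valk step l k)).foldl min (X k)

def mrow (step : List (List Int)) (wn i j : Nat) : List Int :=
  (List.range wn).map (mval step i j)

def rowT (step : List (List Int)) (wn n i : Nat) : List (List Int) :=
  (List.range n).map (fun j => if i ≤ j then mrow step wn i j else zs wn)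

-- the common closed form both programs are proved equal to
def TT (step : List (List Int)) (wn n : Nat) : List (List (List Int)) :=
  (List.range n).map (rowT step wn n)

theorem getD_set_self {α : Type} (l : List α) (i : Nat) (a d : α) (h : i < l.length) :
    (l.set i a).getD i d = a := by
  simp [List.getD_eq_getElem?_getD, h]

theorem getD_set_ne {α : Type} (l : List α) (i j : Nat) (a d : α) (h : i ≠ j) :
    (l.set i a).getD j d = l.getD j d := by
  simp [List.getD_eq_getElem?_getD, List.getElem?_set_ne, h]

theorem set_getD_self {α : Type} (l : List α) (i : Nat) (d : α) (h : i < l.length) :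
    l.set i (l.getD i d) = l := by
  rw [List.getD_eq_getElem l d h]; exact List.set_getElem_self h

theorem map_range_set {α : Type} (n i : Nat) (h : Nat → α) (v : α) (hi : i < n) :
    ((List.range n).map h).set i v = (List.range n).map (fun j => if j = i then v else h j) := by
  apply List.ext_getElem
  · simp
  · intro j hj1 hj2
    simp only [List.length_set, List.length_map, List.length_range] at hj1
    rcases eq_or_ne j i with rfl | hne
    · simp [List.getElem_set_self]
    · simp [List.getElem_set_ne (by omega : i ≠ j), hne]

theorem mval_diag (step : List (List Int)) (i k : Nat) : mval step i i k = valk step i k := by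
  simp [mval]

theorem mval_rec (step : List (List Int)) (i j k : Nat) (h : i < j) :
    mval step i j k = min (valk step i k) (mval step (i + 1) j k) := by
  unfold mval
  have h1 : j - i = (j - (i + 1)) + 1 := by omega
  rw [h1, List.range'_succ]
  simp only [List.map_cons, List.foldl_cons]
  exact List.foldl_assoc ..

theorem mfold_self (step : List (List Int)) (X : Nat → Int) (j k : Nat) :
    mfold step X j j k = min (X k) (valk step j k) := by
  simp [mfold, List.range'_succ]

theorem mfold_rec (step : List (List Int)) (X : Nat → Int) (j j' k : Nat) (h : j < j') :
    mfold step X j j' k = mfold step (fun k => min (X k) (valk step j k)) (j + 1) j' k := by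
  unfold mfold
  have h1 : j' + 1 - j = (j' + 1 - (j + 1)) + 1 := by omega
  rw [h1, List.range'_succ]
  simp

theorem mfold_valk (step : List (List Int)) (i j k : Nat) (h : i ≤ j) :
    mfold step (valk step i) i j k = mval step i j k := by
  unfold mfold mval
  have h1 : j + 1 - i = (j - i) + 1 := by omega
  rw [h1, List.range'_succ]
  simp

-- ===== inner k-loop characterisation =====
theorem innerA_char (sj : List Int) (m : Nat) : ∀ (x cell : List Int), m ≤ x.length →
    (let r := (List.range m).foldl (innerStepA sj) (x, cell)
    r.1.length = x.length ∧ r.2.length = cell.length ∧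
    (∀ k, k < m → r.1.getD k 0 = min (x.getD k 0) (sj.getD k 0)) ∧
    (∀ k, m ≤ k → r.1.getD k 0 = x.getD k 0) ∧
    (∀ k, k < m → k < cell.length → r.2.getD k 0 = min (x.getD k 0) (sj.getD k 0)) ∧
    (∀ k, m ≤ k → r.2.getD k 0 = cell.getD k 0)) := by
  induction m with
  | zero => intro x cell _; simp
  | succ m ih =>
    intro x cell hx
    obtain ⟨h1, h2, h3, h4, h5, h6⟩ := ih x cell (by omega)
    simp only [List.range_succ, List.foldl_append, List.foldl_cons, List.foldl_nil]
    set r := (List.range m).foldl (innerStepA sj) (x, cell) with hr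
    have hxm : r.1.getD m 0 = x.getD m 0 := h4 m le_rfl
    have hmlt : m < r.1.length := by omega
    simp only [innerStepA]
    refine ⟨by simp [h1], by simp [h2], ?_, ?_, ?_, ?_⟩
    · intro k hk
      rcases eq_or_ne k m with rfl | hne
      · rw [getD_set_self _ _ _ _ hmlt, hxm]
      · rw [getD_set_ne _ _ _ _ _ (Ne.symm hne)]; exact h3 k (by omega)
    · intro k hk
      rw [getD_set_ne _ _ _ _ _ (by omega)]; exact h4 k (by omega)
    · intro k hk hkc
      rcases eq_or_ne k m with rfl | hne
      · rw [getD_set_self _ _ _ _ (by omega), getD_set_self _ _ _ _ hmlt, hxm]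
      · rw [getD_set_ne _ _ _ _ _ (Ne.symm hne)]; exact h5 k (by omega) hkc
    · intro k hk
      rw [getD_set_ne _ _ _ _ _ (by omega)]; exact h6 k (by omega)

theorem innerA_cell (sj : List Int) (m : Nat) (x cell : List Int)
    (hx : m ≤ x.length) (hc : cell.length = m) :
    ((List.range m).foldl (innerStepA sj) (x, cell)).2
      = (List.range m).map (fun k => min (x.getD k 0) (sj.getD k 0)) := by
  obtain ⟨h1, h2, h3, h4, h5, h6⟩ := innerA_char sj m x cell hx
  apply List.ext_getElem
  · simp [h2, hc]
  · intro k hk1 hk2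
    simp only [h2, hc] at hk1
    have := h5 k hk1 (by omega)
    rw [List.getD_eq_getElem _ 0 (by omega : k < _)] at this
    simpa using this

-- ===== lifting the j-loop from the whole tensor to row i =====
def rowStepA (step : List (List Int)) (wn : Nat)
    (st : List Int × List (List Int)) (j : Nat) : List Int × List (List Int) :=
  let sj := step.getD j []
  let r := (List.range wn).foldl (innerStepA sj) (st.1, st.2.getD j [])
  (r.1, st.2.set j r.2)

theorem jfold_lift (step : List (List Int)) (wn i : Nat) (js : List Nat) :
    ∀ (x : List Int) (ret : List (List (List Int))), i < ret.length →
    js.foldl (jStepA step wn i) (x, ret)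
      = (let r := js.foldl (rowStepA step wn) (x, ret.getD i []); (r.1, ret.set i r.2)) := by
  induction js with
  | nil => intro x ret hi; simp only [List.foldl_nil]; rw [set_getD_self _ _ _ hi]
  | cons j js ih =>
    intro x ret hi
    simp only [List.foldl_cons]
    rw [ih _ _ (by simp [jStepA, hi])]
    simp only [jStepA, rowStepA]
    rw [getD_set_self _ _ _ _ hi, List.set_set]

-- ===== j-loop characterisation on a single row =====
theorem jfold_char (step : List (List Int)) (wn n : Nat) :
    ∀ (m j : Nat), j + m = n →
    ∀ (x : List Int) (X : Nat → Int) (h : Nat → List Int),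
    wn ≤ x.length → (∀ k, k < wn → x.getD k 0 = X k) → (∀ j', j ≤ j' → h j' = zs wn) →
    ((List.range' j m).foldl (rowStepA step wn) (x, (List.range n).map h)).2
      = (List.range n).map (fun j' =>
          if j ≤ j' then (List.range wn).map (fun k => mfold step X j j' k) else h j') := by
  intro m
  induction m with
  | zero =>
    intro j hjm x X h _ _ _
    simp only [List.range'_zero, List.foldl_nil]
    apply List.map_congr_left
    intro j' hj'
    rw [List.mem_range] at hj'
    rw [if_neg (by omega)]
  | succ m ih =>
    intro j hjm x X h hx hX hh
    have hjn : j < n := by omega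
    rw [List.range'_succ, List.foldl_cons]
    have hrow : rowStepA step wn (x, (List.range n).map h) j
        = (((List.range wn).foldl (innerStepA (step.getD j [])) (x, zs wn)).1,
           (List.range n).map (fun j' => if j' = j
              then (List.range wn).map (fun k => min (x.getD k 0) ((step.getD j []).getD k 0))
              else h j')) := by
      simp only [rowStepA]
      rw [PySem.List.getD_map_range _ _ _ _ hjn, hh j le_rfl]
      rw [innerA_cell _ _ _ _ hx (by simp [zs])]
      rw [map_range_set _ _ _ _ hjn]
    rw [hrow]
    obtain ⟨h1, _, h3, _, _, _⟩ := innerA_char (step.getD j []) wn x (zs wn) hx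
    rw [ih (j + 1) (by omega) _ (fun k => min (X k) (valk step j k)) _
        (by omega)
        (fun k hk => by rw [h3 k hk, hX k hk]; rfl)
        (fun j' hj' => by rw [if_neg (by omega)]; exact hh j' (by omega))]
    apply List.map_congr_left
    intro j' hj'
    rw [List.mem_range] at hj'
    rcases lt_trichotomy j' j with hlt | rfl | hgt
    · rw [if_neg (show ¬ (j + 1 ≤ j') by omega), if_neg (show ¬ (j' = j) by omega),
        if_neg (show ¬ (j ≤ j') by omega)]
    · rw [if_neg (show ¬ (j' + 1 ≤ j') by omega), if_pos rfl, if_pos le_rfl]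
      apply List.map_congr_left
      intro k hk
      rw [List.mem_range] at hk
      rw [mfold_self, hX k hk]; rfl
    · rw [if_pos (show j + 1 ≤ j' by omega), if_pos (show j ≤ j' by omega)]
      apply List.map_congr_left
      intro k _
      rw [mfold_rec step X j j' k hgt]

-- ===== outer i-loop =====
def rowFinal (step : List (List Int)) (wn n i : Nat) : List (List Int) :=
  (List.range n).map (fun j =>
    if i ≤ j then (List.range wn).map (fun k => mfold step (valk step i) i j k) else zs wn)

theorem outer_char (step : List (List Int)) (wn n : Nat)
    (hpre : ∀ i, i < n → wn ≤ (step.getD i []).length) :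
    ∀ (m s : Nat), s + m = n → ∀ (H : Nat → List (List Int)),
    (∀ i', s ≤ i' → H i' = (List.range n).map (fun _ => zs wn)) →
    ((List.range' s m).foldl
        (fun ret i => ((List.range' i (n - i)).foldl (jStepA step wn i) (step.getD i [], ret)).2)
        ((List.range n).map H))
      = (List.range n).map (fun i => if s ≤ i then rowFinal step wn n i else H i) := by
  intro m
  induction m with
  | zero =>
    intro s hsm H _
    simp only [List.range'_zero, List.foldl_nil]
    apply List.map_congr_left
    intro i hi
    rw [List.mem_range] at hi
    rw [if_neg (by omega)]
  | succ m ih =>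
    intro s hsm H hH
    have hsn : s < n := by omega
    rw [List.range'_succ, List.foldl_cons]
    rw [jfold_lift step wn s _ _ _ (by simp [hsn])]
    simp only
    rw [PySem.List.getD_map_range _ _ _ _ hsn, hH s le_rfl]
    rw [jfold_char step wn n (n - s) s (by omega) _ (valk step s) (fun _ => zs wn)
        (hpre s hsn) (fun k _ => rfl) (fun _ _ => rfl)]
    rw [map_range_set _ _ _ _ hsn]
    rw [ih (s + 1) (by omega) _
        (fun i' hi' => by rw [if_neg (by omega)]; exact hH i' (by omega))]
    apply List.map_congr_left
    intro i hi
    rw [List.mem_range] at hi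
    rcases lt_trichotomy i s with hlt | rfl | hgt
    · rw [if_neg (show ¬ (s + 1 ≤ i) by omega), if_neg (show ¬ (i = s) by omega),
        if_neg (show ¬ (s ≤ i) by omega)]
    · rw [if_neg (show ¬ (i + 1 ≤ i) by omega), if_pos rfl, if_pos le_rfl]
      rfl
    · rw [if_pos (show s + 1 ≤ i by omega), if_pos (show s ≤ i by omega)]

theorem A_eq_TT (step : List (List Int)) (e w : Int)
    (hpre : Pre_generate_overlap step e w) :
    generate_overlap step e w = TT step w.toNat (e + 2).toNat := by
  obtain ⟨hlen, hw⟩ := hpre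
  have hpre' : ∀ i, i < (e + 2).toNat → w.toNat ≤ (step.getD i []).length := by
    intro i hi
    have hil : i < step.length := by omega
    rw [List.getD_eq_getElem _ _ hil]
    have hmem : step[i] ∈ step.take (e + 2).toNat := by
      have : (step.take (e + 2).toNat)[i]'(by simp; omega) = step[i] := List.getElem_take
      rw [← this]; exact List.getElem_mem _
    exact Int.toNat_le.mpr (hw _ hmem)
  unfold generate_overlap
  simp only
  rw [show ((List.range (e + 2).toNat).map (fun _ => (List.range (e + 2).toNat).map (fun _ => List.replicate w.toNat (0 : Int))))
      = ((List.range (e + 2).toNat).map (fun _ => (List.range (e + 2).toNat).map (fun _ => zs w.toNat))) from rfl]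
  rw [show (List.range (e + 2).toNat) = List.range' 0 ((e + 2).toNat) from List.range_eq_range']
  rw [show ((List.range' 0 (e + 2).toNat).map (fun _ => (List.range' 0 (e + 2).toNat).map (fun _ => zs w.toNat)))
      = ((List.range (e + 2).toNat).map (fun _ => (List.range (e + 2).toNat).map (fun _ => zs w.toNat))) by
        rw [← List.range_eq_range']]
  rw [outer_char step w.toNat ((e + 2).toNat) hpre' ((e + 2).toNat) 0 (by omega)
      (fun _ => (List.range (e + 2).toNat).map (fun _ => zs w.toNat)) (fun _ _ => rfl)]
  unfold TT
  apply List.map_congr_left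
  intro i hi
  rw [List.mem_range] at hi
  rw [if_pos (Nat.zero_le i)]
  unfold rowFinal rowT
  apply List.map_congr_left
  intro j hj
  rw [List.mem_range] at hj
  by_cases hij : i ≤ j
  · rw [if_pos hij, if_pos hij]
    unfold mrow
    apply List.map_congr_left
    intro k _
    exact mfold_valk step i j k hij
  · rw [if_neg hij, if_neg hij]

-- ===== B equals the closed form =====
theorem B_fold (step : List (List Int)) (wn n : Nat) :
    ∀ (m i : Nat), i + m = n →
    (List.range' i m).foldr (fun i rows => rowB step wn n i rows :: rows) []
      = (List.range' i m).map (rowT step wn n) := by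
  intro m
  induction m with
  | zero => intro i _; simp
  | succ m ih =>
    intro i him
    rw [List.range'_succ, List.foldr_cons, List.map_cons, ih (i + 1) (by omega)]
    congr 1
    have hbase : (List.range i).map (fun _ => List.replicate wn (0 : Int))
        ++ [(List.range wn).map (fun k => (step.getD i []).getD k 0)]
        = (List.range' 0 (i + 1)).map
            (fun j => if i ≤ j then mrow step wn i j else zs wn) := by
      rw [show List.range' 0 (i + 1) = List.range' 0 i ++ [i] by
        rw [List.range'_1_concat]; norm_num]
      rw [List.map_append]
      congr 1
      · rw [← List.range_eq_range']
        apply List.map_congr_left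
        intro j hj
        rw [List.mem_range] at hj
        rw [if_neg (by omega)]
        rfl
      · simp only [List.map_cons, List.map_nil, if_pos le_rfl]
        congr 1
        unfold mrow
        apply List.map_congr_left
        intro k _
        rw [mval_diag]
        rfl
    cases m with
    | zero =>
      simp only [List.range'_zero, List.map_nil, rowB]
      unfold rowT
      rw [List.range_eq_range' (n := n), show n = i + 1 by omega]
      exact hbase
    | succ m' =>
      rw [List.range'_succ, List.map_cons]
      simp only [rowB]
      have hg : rowT step wn n i
          = (List.range' 0 (i + 1)).map (fun j => if i ≤ j then mrow step wn i j else zs wn)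
            ++ (List.range' (i + 1) (m' + 1)).map (fun j => if i ≤ j then mrow step wn i j else zs wn) := by
        unfold rowT
        rw [List.range_eq_range' (n := n), show n = (i + 1) + (m' + 1) by omega,
          show List.range' 0 ((i + 1) + (m' + 1)) = List.range' 0 (i + 1) ++ List.range' (i + 1) (m' + 1) by
            have := List.range'_append (s := 0) (m := i + 1) (n := m' + 1) (step := 1)
            simpa using this.symm,
          List.map_append]
      rw [hg, ← hbase]
      congr 1
      rw [show n - (i + 1) = m' + 1 by omega]
      apply List.map_congr_left
      intro j hj
      rw [List.mem_range'_1] at hj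
      rw [if_pos (by omega)]
      have hjn : j < n := by omega
      have hprev : (rowT step wn n (i + 1)).getD j [] = mrow step wn (i + 1) j := by
        unfold rowT
        rw [PySem.List.getD_map_range _ _ _ _ hjn, if_pos (by omega)]
      rw [hprev]
      unfold mrow
      apply List.map_congr_left
      intro k hk
      rw [List.mem_range] at hk
      rw [PySem.List.getD_map_range _ _ _ _ hk]
      exact (mval_rec step i j k (by omega)).symm

theorem B_eq_TT (step : List (List Int)) (e w : Int) :
    generate_overlap_alt step e w = TT step w.toNat (e + 2).toNat := by
  unfold generate_overlap_alt TT
  simp only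
  rw [show (List.range (e + 2).toNat) = List.range' 0 ((e + 2).toNat) from List.range_eq_range']
  exact B_fold step w.toNat ((e + 2).toNat) ((e + 2).toNat) 0 (by omega)

-- ===== VERDICT (by name: the statement is the Claim_ definition above) =====
theorem generate_overlap_spec : Claim_equal_generate_overlap := by
  intro step e w _hdom hpre
  unfold Spec_generate_overlap
  rw [A_eq_TT step e w hpre, B_eq_TT]
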